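-- pv_equiv track=rewrite | github.com/miliar/Code_Jam_Webscraper | solutions_python/Problem_213/30.py | check
-- ===== SOURCE A (Python) =====
-- def check(r, n, c, t):
--     pp = [p for p, b in t]
--     pp.sort()
--     i = 0
--     free = 0
--     pro = 0
--     for s in range(n):
--         q = 0
--         while i < len(pp) and pp[i] == s:
--             q += 1
--             i += 1
--         if q > r + free:
--             return None
--         if q > r:
--             free -= q - r
--             pro += q - r
--         else:
--             free += r - q
--     return pro
-- ===== SOURCE B (Python) =====
-- def check(r, n, c, t):
--     freq = {}
--     for p, b in t:
--         freq[p] = freq.get(p, 0) + 1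
--     free = 0
--     pro = 0
--     for s in range(n):
--         q = freq.get(s, 0)
--         if q > r + free:
--             return None
--         if q > r:
--             free -= q - r
--             pro += q - r
--         else:
--             free += r - q
--     return pro
-- ===== Notes on version B (the rewrite author's own statement) =====
-- stated objective: simpler
-- what changed: Replaces A's sort of all positions plus a merge-pointer inner while-loop by a frequency table built in one pass over t, so each slot's demand is a single dict lookup and the sort and inner loop disappear.
-- intended difference: On inputs with some negative position p (with n > 0, r >= 0, and some slot in [0,n) demanded more than r times) A's sorted merge pointer stalls on the negative entry forever, so A sees every slot's demand as 0 and returns 0, while B counts the nonnegative positions correctly and returns the true overflow (or None); B's value is the intended simulation result. — e.g. on check(1, 1, 0, [(-1, 0), (0, 0), (0, 0)]): A returns some 0, B returns none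
import Mathlib
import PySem

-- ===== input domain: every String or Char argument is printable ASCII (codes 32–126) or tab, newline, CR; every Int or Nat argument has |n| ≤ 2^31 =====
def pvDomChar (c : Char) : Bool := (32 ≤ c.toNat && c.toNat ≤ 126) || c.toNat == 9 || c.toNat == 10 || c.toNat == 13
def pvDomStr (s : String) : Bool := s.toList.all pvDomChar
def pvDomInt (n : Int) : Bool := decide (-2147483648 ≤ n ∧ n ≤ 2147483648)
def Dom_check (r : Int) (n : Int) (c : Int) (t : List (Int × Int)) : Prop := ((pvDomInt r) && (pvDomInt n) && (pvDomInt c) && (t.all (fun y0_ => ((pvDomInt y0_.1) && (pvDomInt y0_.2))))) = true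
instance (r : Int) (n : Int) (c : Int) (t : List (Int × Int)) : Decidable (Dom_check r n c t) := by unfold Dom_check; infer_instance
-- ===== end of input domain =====

-- B replaces A's sort + merge-pointer scan by a frequency table and one lookup per slot (simpler);
-- on inputs with a negative position A's pointer stalls and miscounts — see D_check below.

-- ===== PORT A =====
-- inner 'while i < len(pp) and pp[i] == s: q += 1; i += 1' (i, q are Python ints that stay ≥ 0;
-- carried as Nat so pp[i] is the same in-range access Python performs)
def pvWhileA (pp : List Int) (s : Int) (i q : Nat) : Nat × Nat :=
  if h : i < pp.length then
    if pp[i] = s then pvWhileA pp s (i + 1) (q + 1) else (i, q)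
  else (i, q)
termination_by pp.length - i

-- the 'for s in range(n)' loop with early 'return None'; the counter s is carried directly
-- (range is lazy in Python, so no list of length n is built)
def pvLoopA (pp : List Int) (r n : Int) (s : Int) (i : Nat) (free pro : Int) : Option Int :=
  if _h : s < n then
    let iq := pvWhileA pp s i 0
    let q : Int := (iq.2 : Int)
    if q > r + free then none
    else if q > r then pvLoopA pp r n (s + 1) iq.1 (free - (q - r)) (pro + (q - r))
    else pvLoopA pp r n (s + 1) iq.1 (free + (r - q)) pro
  else some pro
termination_by (n - s).toNat
decreasing_by all_goals omega

def check (r : Int) (n : Int) (c : Int) (t : List (Int × Int)) : Option Int :=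
  pvLoopA (PySem.List.sorted (t.map (fun x => x.1)) (fun x => x) false) r n 0 0 0 0

-- ===== PORT B =====
-- the 'for s in range(n)' loop of Source B, counter carried directly as above
def pvLoopB (freq : PySem.Dict Int Int) (r n : Int) (s : Int) (free pro : Int) : Option Int :=
  if _h : s < n then
    let q := freq.getD s 0
    if q > r + free then none
    else if q > r then pvLoopB freq r n (s + 1) (free - (q - r)) (pro + (q - r))
    else pvLoopB freq r n (s + 1) (free + (r - q)) pro
  else some pro
termination_by (n - s).toNat
decreasing_by all_goals omega

def check_alt (r : Int) (n : Int) (c : Int) (t : List (Int × Int)) : Option Int :=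
  let freq := t.foldl (fun d x => d.insert x.1 (d.getD x.1 0 + 1)) (PySem.Dict.empty : PySem.Dict Int Int)
  pvLoopB freq r n 0 0 0

-- ===== PRECONDITION & SPEC =====
-- On inputs with a negative position (while n > 0, r ≥ 0 and some slot in [0,n) occurs more than r
-- times) A's sorted merge pointer stalls on the negative entry, sees every slot's demand as 0 and
-- returns 0, while B counts the nonnegative positions correctly and returns the true overflow (or
-- None); B's value is the intended simulation result.
def D_check (r : Int) (n : Int) (c : Int) (t : List (Int × Int)) : Prop :=
  0 ≤ r ∧ 0 < n ∧ (∃ x ∈ t, x.1 < 0) ∧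
    (∃ x ∈ t, 0 ≤ x.1 ∧ x.1 < n ∧ r < ((t.map (fun y => y.1)).count x.1 : Int))
instance (r : Int) (n : Int) (c : Int) (t : List (Int × Int)) : Decidable (D_check r n c t) := by
  unfold D_check; infer_instance

def Spec_check (r : Int) (n : Int) (c : Int) (t : List (Int × Int)) (out : Option Int) : Prop :=
  ¬ D_check r n c t → out = check_alt r n c t
instance (r : Int) (n : Int) (c : Int) (t : List (Int × Int)) (out : Option Int) : Decidable (Spec_check r n c t out) := by unfold Spec_check; infer_instance

def pvDiffWitness_check : Int × Int × Int × (List (Int × Int)) := (1, 1, 0, [(-1, 0), (0, 0), (0, 0)])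
def pvDiffWitnessOut_check : (Option Int) × (Option Int) := (some 0, none)

-- ===== CLAIM (what is proved, stated in full; the proofs are below) =====
def Claim_unchanged_check : Prop := ∀ (r : Int) (n : Int) (c : Int) (t : List (Int × Int)), Dom_check r n c t → Spec_check r n c t (check r n c t)
def Claim_changed_check : Prop := Dom_check (pvDiffWitness_check.1) (pvDiffWitness_check.2.1) (pvDiffWitness_check.2.2.1) (pvDiffWitness_check.2.2.2) ∧ D_check (pvDiffWitness_check.1) (pvDiffWitness_check.2.1) (pvDiffWitness_check.2.2.1) (pvDiffWitness_check.2.2.2) ∧ check (pvDiffWitness_check.1) (pvDiffWitness_check.2.1) (pvDiffWitness_check.2.2.1) (pvDiffWitness_check.2.2.2) = pvDiffWitnessOut_check.1 ∧ check_alt (pvDiffWitness_check.1) (pvDiffWitness_check.2.1) (pvDiffWitness_check.2.2.1) (pvDiffWitness_check.2.2.2) = pvDiffWitnessOut_check.2 ∧ pvDiffWitnessOut_check.1 ≠ pvDiffWitnessOut_check.2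
def Claim_exact_check : Prop := ∀ (r : Int) (n : Int) (c : Int) (t : List (Int × Int)), Dom_check r n c t → D_check r n c t → check r n c t ≠ check_alt r n c t

-- ===== LEMMAS AND PROOFS =====

-- the inner while loop consumes exactly the run of elements equal to s at the pointer
theorem pvWhileA_drop (pp : List Int) (s : Int) : ∀ (i q : Nat),
    pvWhileA pp s i q = (i + ((pp.drop i).takeWhile (fun x => x == s)).length,
                         q + ((pp.drop i).takeWhile (fun x => x == s)).length) := by
  intro i q
  induction i, q using pvWhileA.induct pp s with
  | case1 i q h heq ih =>
    rw [pvWhileA]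
    simp only [h, heq, dif_pos, if_pos, ih]
    rw [List.drop_eq_getElem_cons h]
    simp [heq]
    omega
  | case2 i q h heq =>
    rw [pvWhileA]
    simp only [h, dif_pos, heq]
    rw [List.drop_eq_getElem_cons h]
    simp [heq]
  | case3 i q h =>
    rw [pvWhileA]
    simp only [h]
    rw [List.drop_eq_nil_of_le (by omega)]
    simp

-- A's loop, rephrased on the remaining suffix of pp
def pvLoopV (r n : Int) (s : Int) (v : List Int) (free pro : Int) : Option Int :=
  if _h : s < n then
    let q : Int := ((v.takeWhile (fun x => x == s)).length : Int)
    if q > r + free then none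
    else if q > r then pvLoopV r n (s + 1) (v.dropWhile (fun x => x == s)) (free - (q - r)) (pro + (q - r))
    else pvLoopV r n (s + 1) (v.dropWhile (fun x => x == s)) (free + (r - q)) pro
  else some pro
termination_by (n - s).toNat
decreasing_by all_goals omega

theorem dropWhile_eq_drop_len (w : List Int) (p : Int → Bool) :
    w.drop (w.takeWhile p).length = w.dropWhile p := by
  have h := List.drop_left (l₁ := w.takeWhile p) (l₂ := w.dropWhile p)
  rw [List.takeWhile_append_dropWhile] at h
  exact h

theorem pvLoopA_eq_V (pp : List Int) (r n : Int) : ∀ (k : Nat) (s : Int) (i : Nat) (free pro : Int),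
    (n - s).toNat = k → pvLoopA pp r n s i free pro = pvLoopV r n s (pp.drop i) free pro := by
  intro k
  induction k with
  | zero =>
    intro s i free pro hk
    rw [pvLoopA, pvLoopV, dif_neg (by omega), dif_neg (by omega)]
  | succ k ih =>
    intro s i free pro hk
    have hlt : s < n := by omega
    have hstep : pp.drop (i + ((pp.drop i).takeWhile (fun x => x == s)).length)
        = (pp.drop i).dropWhile (fun x => x == s) := by
      rw [← dropWhile_eq_drop_len (pp.drop i) (fun x => x == s), List.drop_drop, Nat.add_comm]
    rw [pvLoopA, pvLoopV, dif_pos hlt, dif_pos hlt]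
    simp only [pvWhileA_drop, Nat.zero_add]
    rw [ih (s + 1) _ _ _ (by omega), ih (s + 1) _ _ _ (by omega), hstep]

theorem takeWhile_len_eq_count (s : Int) : ∀ (v : List Int), v.Pairwise (· ≤ ·) →
    (∀ x ∈ v, s ≤ x) → ((v.takeWhile (fun x => x == s)).length : Int) = (v.count s : Int) := by
  intro v
  induction v with
  | nil => intro _ _; simp
  | cons x v' ih =>
    intro hp hlb
    by_cases hx : x = s
    · subst hx
      simp only [List.takeWhile_cons, beq_self_eq_true, if_pos, List.length_cons,
        List.count_cons_self]
      have := ih hp.of_cons (fun y hy => hlb y (List.mem_cons_of_mem _ hy))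
      push_cast
      push_cast at this
      omega
    · have h0 : v'.count s = 0 := by
        refine List.count_eq_zero.mpr ?_
        intro hs
        have := (List.pairwise_cons.mp hp).1 s hs
        have := hlb x (List.mem_cons_self)
        omega
      simp [List.takeWhile_cons, hx, List.count_cons, h0]

theorem dropWhile_facts (s : Int) (v : List Int) (hp : v.Pairwise (· ≤ ·))
    (hlb : ∀ x ∈ v, s ≤ x) :
    (v.dropWhile (fun x => x == s)).Pairwise (· ≤ ·) ∧
    (∀ x ∈ v.dropWhile (fun x => x == s), s + 1 ≤ x) ∧
    (∀ x : Int, s + 1 ≤ x → (v.dropWhile (fun x => x == s)).count x = v.count x) := by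
  induction v with
  | nil => simp
  | cons y v' ih =>
    by_cases hy : y = s
    · subst hy
      have hrec := ih hp.of_cons (fun z hz => hlb z (List.mem_cons_of_mem _ hz))
      refine ⟨?_, ?_, ?_⟩
      · simpa using hrec.1
      · simpa using hrec.2.1
      · intro x hx
        have := hrec.2.2 x hx
        simp only [List.dropWhile_cons, beq_self_eq_true, if_pos]
        rw [this, List.count_cons]
        have : ¬ (y = x) := by omega
        simp [this]
    · have hgt : s + 1 ≤ y := by
        have := hlb y (List.mem_cons_self)
        omega
      have hdrop : (y :: v').dropWhile (fun x => x == s) = y :: v' := by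
        simp [List.dropWhile_cons, hy]
      refine ⟨by rw [hdrop]; exact hp, ?_, by intro x _; rw [hdrop]⟩
      intro z hz
      rw [hdrop] at hz
      rcases List.mem_cons.mp hz with h | h
      · omega
      · have := (List.pairwise_cons.mp hp).1 z h
        omega

-- the main agreement: counts seen by A's pointer = counts in the frequency dict
theorem pvLoopV_eq_B (freq : PySem.Dict Int Int) (r n : Int) (w : List Int)
    (hw : ∀ x : Int, freq.getD x 0 = (w.count x : Int)) :
    ∀ (k : Nat) (s₀ : Int) (v : List Int) (free pro : Int), (n - s₀).toNat = k →
      v.Pairwise (· ≤ ·) → (∀ x ∈ v, s₀ ≤ x) →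
      (∀ x : Int, s₀ ≤ x → (v.count x : Int) = (w.count x : Int)) →
      pvLoopV r n s₀ v free pro = pvLoopB freq r n s₀ free pro := by
  intro k
  induction k with
  | zero =>
    intro s₀ v free pro hk _ _ _
    rw [pvLoopV, pvLoopB, dif_neg (by omega), dif_neg (by omega)]
  | succ k ih =>
    intro s₀ v free pro hk hp hlb hcnt
    have hlt : s₀ < n := by omega
    have hq : ((v.takeWhile (fun x => x == s₀)).length : Int) = freq.getD s₀ 0 := by
      rw [takeWhile_len_eq_count s₀ v hp hlb, hw, hcnt s₀ le_rfl]
    obtain ⟨hp', hlb', hcnt'⟩ := dropWhile_facts s₀ v hp hlb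
    have hrec : ∀ (free' pro' : Int),
        pvLoopV r n (s₀ + 1) (v.dropWhile (fun x => x == s₀)) free' pro'
          = pvLoopB freq r n (s₀ + 1) free' pro' := by
      intro free' pro'
      refine ih (s₀ + 1) _ free' pro' (by omega) hp' hlb' ?_
      intro x hx
      rw [hcnt' x hx, ← hcnt x (by omega)]
    rw [pvLoopV, pvLoopB, dif_pos hlt, dif_pos hlt]
    simp only [hq]
    split_ifs <;> simp [hrec]

-- with a negative head, every takeWhile is empty: A's pointer never moves
theorem pvLoopV_stall (r n : Int) (v : List Int) (hp : v.Pairwise (· ≤ ·))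
    (hneg : ∃ y ∈ v, y < 0) (hr : 0 ≤ r) :
    ∀ (k : Nat) (s₀ : Int) (free pro : Int), (n - s₀).toNat = k → 0 ≤ s₀ → 0 ≤ free →
      pvLoopV r n s₀ v free pro = some pro := by
  obtain ⟨y, hy, hyneg⟩ := hneg
  match v, hp, hy with
  | h :: tl, hp, hy =>
    have hh : h < 0 := by
      rcases List.mem_cons.mp hy with he | hm
      · omega
      · have := (List.pairwise_cons.mp hp).1 y hm
        omega
    intro k
    induction k with
    | zero =>
      intro s₀ free pro hk _ _
      rw [pvLoopV, dif_neg (by omega)]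
    | succ k ih =>
      intro s₀ free pro hk hs₀ hfree
      have hne : (h == s₀) = false := by simp; omega
      rw [pvLoopV, dif_pos (by omega : s₀ < n)]
      simp only [List.takeWhile_cons, List.dropWhile_cons, hne, Bool.false_eq_true,
        if_false, List.length_nil, Nat.cast_zero]
      rw [if_neg (by omega), if_neg (by omega)]
      exact ih (s₀ + 1) (free + (r - 0)) pro (by omega) (by omega) (by omega)

theorem pvLoopB_small (freq : PySem.Dict Int Int) (r n : Int) :
    ∀ (k : Nat) (s : Int) (free pro : Int), (n - s).toNat = k → 0 ≤ free →
      (∀ s', s ≤ s' → s' < n → freq.getD s' 0 ≤ r) →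
      pvLoopB freq r n s free pro = some pro := by
  intro k
  induction k with
  | zero =>
    intro s free pro hk _ _
    rw [pvLoopB, dif_neg (by omega)]
  | succ k ih =>
    intro s free pro hk hfree hsm
    have hlt : s < n := by omega
    have hq : freq.getD s 0 ≤ r := hsm s le_rfl hlt
    rw [pvLoopB, dif_pos hlt]
    simp only []
    rw [if_neg (by omega), if_neg (by omega)]
    exact ih (s + 1) _ pro (by omega) (by omega)
      (fun s' h1 h2 => hsm s' (by omega) h2)

theorem pvLoopB_mono (freq : PySem.Dict Int Int) (r n : Int) :
    ∀ (k : Nat) (s : Int) (free pro : Int), (n - s).toNat = k →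
      pvLoopB freq r n s free pro = none
        ∨ ∃ p, pvLoopB freq r n s free pro = some p ∧ pro ≤ p := by
  intro k
  induction k with
  | zero =>
    intro s free pro hk
    rw [pvLoopB, dif_neg (by omega)]
    exact Or.inr ⟨pro, rfl, le_rfl⟩
  | succ k ih =>
    intro s free pro hk
    rw [pvLoopB, dif_pos (by omega : s < n)]
    simp only []
    split_ifs with h1 h2
    · exact Or.inl rfl
    · rcases ih (s + 1) (free - (freq.getD s 0 - r)) (pro + (freq.getD s 0 - r)) (by omega)
        with h | ⟨p, hp, hle⟩
      · exact Or.inl h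
      · exact Or.inr ⟨p, hp, by omega⟩
    · exact ih (s + 1) (free + (r - freq.getD s 0)) pro (by omega)

theorem pvLoopB_big (freq : PySem.Dict Int Int) (r n : Int) :
    ∀ (k : Nat) (s : Int) (free pro : Int), (n - s).toNat = k → 0 ≤ free →
      (∃ s', s ≤ s' ∧ s' < n ∧ r < freq.getD s' 0) →
      pvLoopB freq r n s free pro = none
        ∨ ∃ p, pvLoopB freq r n s free pro = some p ∧ pro < p := by
  intro k
  induction k with
  | zero =>
    intro s free pro hk _ hex
    rcases hex with ⟨s', h1, h2, _⟩
    omega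
  | succ k ih =>
    intro s free pro hk hfree hex
    have hlt : s < n := by omega
    rw [pvLoopB, dif_pos hlt]
    simp only []
    split_ifs with h1 h2
    · exact Or.inl rfl
    · rcases pvLoopB_mono freq r n (n - (s + 1)).toNat (s + 1)
        (free - (freq.getD s 0 - r)) (pro + (freq.getD s 0 - r)) rfl with h | ⟨p, hp, hle⟩
      · exact Or.inl h
      · exact Or.inr ⟨p, hp, by omega⟩
    · rcases hex with ⟨s', hs1, hs2, hq'⟩
      have hne : s' ≠ s := by intro he; subst he; omega
      exact ih (s + 1) (free + (r - freq.getD s 0)) pro (by omega) (by omega)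
        ⟨s', by omega, hs2, hq'⟩

theorem freq_getD (t : List (Int × Int)) (x : Int) :
    (t.foldl (fun d x => d.insert x.1 (d.getD x.1 0 + 1)) (PySem.Dict.empty : PySem.Dict Int Int)).getD x 0
      = ((t.map (fun y => y.1)).count x : Int) := by
  rw [← List.foldl_map (f := fun y : Int × Int => y.1)
    (g := fun (d : PySem.Dict Int Int) p => d.insert p (d.getD p 0 + 1))]
  rw [PySem.Dict.foldl_insert_getD_add_one_eq_counter]
  exact PySem.Dict.getD_counter ..

-- ===== VERDICT (by name: the statement is the Claim_ definition above) =====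
theorem check_spec : Claim_unchanged_check := by
  unfold Claim_unchanged_check Spec_check
  intro r n c t _ hnd
  unfold check check_alt
  set w := t.map (fun x => x.1) with hw_def
  set pp := PySem.List.sorted w (fun x => x) false with hpp_def
  set freq := t.foldl (fun d x => d.insert x.1 (d.getD x.1 0 + 1))
    (PySem.Dict.empty : PySem.Dict Int Int) with hfreq_def
  have hperm : pp.Perm w := PySem.List.sorted_perm ..
  have hpair : pp.Pairwise (· ≤ ·) := PySem.List.sorted_pairwise ..
  have hcnt : ∀ x : Int, pp.count x = w.count x := fun x => hperm.count_eq x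
  have hfg : ∀ x : Int, freq.getD x 0 = (w.count x : Int) := fun x => freq_getD t x
  rw [show pvLoopA pp r n 0 0 0 0 = pvLoopV r n 0 pp 0 0 from by
    rw [pvLoopA_eq_V pp r n (n - 0).toNat 0 0 0 0 rfl, List.drop_zero]]
  by_cases hn : n ≤ 0
  · rw [pvLoopV, pvLoopB, dif_neg (by omega), dif_neg (by omega)]
  · by_cases hr : r < 0
    · rw [pvLoopV, pvLoopB, dif_pos (by omega : (0:Int) < n), dif_pos (by omega : (0:Int) < n)]
      simp only []
      rw [if_pos (by have := Int.natCast_nonneg ((pp.takeWhile (fun x => x == (0:Int))).length); omega),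
        if_pos (by have := hfg 0; have := Int.natCast_nonneg (w.count 0); omega)]
    · by_cases hneg : ∃ x ∈ t, x.1 < 0
      · have hbig : ¬ (∃ x ∈ t, 0 ≤ x.1 ∧ x.1 < n ∧ r < (w.count x.1 : Int)) :=
          fun h4 => hnd ⟨by omega, by omega, hneg, h4⟩
        rw [pvLoopV_stall r n pp hpair ?_ (by omega) (n - 0).toNat 0 0 0 rfl le_rfl le_rfl]
        · rw [pvLoopB_small freq r n (n - 0).toNat 0 0 0 rfl le_rfl ?_]
          intro s hs0 hsn
          rw [hfg s]
          by_cases hmem : s ∈ w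
          · rcases List.mem_map.mp hmem with ⟨y, hy, hy1⟩
            by_contra hgt
            exact hbig ⟨y, hy, by rw [hy1]; exact hs0, by rw [hy1]; exact hsn, by rw [hy1]; omega⟩
          · rw [List.count_eq_zero.mpr hmem]
            omega
        · rcases hneg with ⟨x, hx, hx1⟩
          exact ⟨x.1, hperm.mem_iff.mpr (List.mem_map.mpr ⟨x, hx, rfl⟩), hx1⟩
      · refine pvLoopV_eq_B freq r n w hfg (n - 0).toNat 0 pp 0 0 rfl hpair ?_ ?_
        · intro x hx
          rcases List.mem_map.mp (hperm.mem_iff.mp hx) with ⟨y, hy, hy1⟩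
          push_neg at hneg
          rw [← hy1]
          exact hneg y hy
        · intro x _
          rw [hcnt x]

theorem check_changed : Claim_changed_check := by
  unfold Claim_changed_check
  refine ⟨by decide, by decide, ?_, ?_, by decide⟩
  · show check 1 1 0 [(-1, 0), (0, 0), (0, 0)] = some 0
    have h1 : (PySem.List.sorted [(-1 : Int), 0, 0] (fun x => x) false) = [-1, 0, 0] := by decide
    simp only [check, List.map, h1]
    rw [pvLoopA, dif_pos (by norm_num : (0:Int) < 1)]
    simp only [pvWhileA_drop, List.drop_zero]
    norm_num
    rw [pvLoopA, dif_neg (by norm_num)]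
  · show check_alt 1 1 0 [(-1, 0), (0, 0), (0, 0)] = none
    have hf : ([((-1:Int), (0:Int)), (0, 0), (0, 0)].foldl
        (fun d x => d.insert x.1 (d.getD x.1 0 + 1)) (PySem.Dict.empty : PySem.Dict Int Int)).getD 0 0 = 2 := by
      rw [freq_getD]; decide
    simp only [check_alt]
    rw [pvLoopB, dif_pos (by norm_num : (0:Int) < 1)]
    simp only [hf]
    norm_num

theorem check_tight : Claim_exact_check := by
  unfold Claim_exact_check
  intro r n c t _ hd
  rcases hd with ⟨hr, hn, hneg, x, hx, hx0, hxn, hxc⟩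
  unfold check check_alt
  set w := t.map (fun x => x.1) with hw_def
  set pp := PySem.List.sorted w (fun x => x) false with hpp_def
  set freq := t.foldl (fun d x => d.insert x.1 (d.getD x.1 0 + 1))
    (PySem.Dict.empty : PySem.Dict Int Int) with hfreq_def
  have hperm : pp.Perm w := PySem.List.sorted_perm ..
  have hpair : pp.Pairwise (· ≤ ·) := PySem.List.sorted_pairwise ..
  have hfg : ∀ y : Int, freq.getD y 0 = (w.count y : Int) := fun y => freq_getD t y
  have hA : pvLoopA pp r n 0 0 0 0 = some 0 := by
    rw [pvLoopA_eq_V pp r n (n - 0).toNat 0 0 0 0 rfl, List.drop_zero]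
    refine pvLoopV_stall r n pp hpair ?_ hr (n - 0).toNat 0 0 0 rfl le_rfl le_rfl
    rcases hneg with ⟨y, hy, hy1⟩
    exact ⟨y.1, hperm.mem_iff.mpr (List.mem_map.mpr ⟨y, hy, rfl⟩), hy1⟩
  have hB := pvLoopB_big freq r n (n - 0).toNat 0 0 0 rfl le_rfl
    ⟨x.1, hx0, hxn, by rw [hfg x.1]; exact hxc⟩
  rw [hA]
  rcases hB with h | ⟨p, hp, hpos⟩
  · rw [h]; simp
  · rw [hp]
    simp only [ne_eq, Option.some.injEq]
    omega
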